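/- GENERATED by mk_final_copies.py from the proof of the farm's unit `vorbis_decode_packet_rest.1a` (farm:vorbis_decode_packet_rest.1a.1: Proof.lean) as the
   re-elaboration sweep compiled it — do not edit. -/
import Vorbis.Spec.Units.vorbis_decode_packet_rest_1a
import Vorbis.Spec.Worked.vorbis_decode_packet_rest_1a_Lemmas

open X86 X86.User Asan Vorbis Vorbis.Spec Vorbis.Spec.vorbis_decode_packet_rest

/-- Unit `vorbis_decode_packet_rest.1a`: the prologue of `vorbis_decode_packet_rest` (0x110b00–0x110bd0: six pushes, `sub rsp, 0xb88`, the
five spills, the frame header, the twelve poison stores) takes the function's entry to the assertion `At1b` at 0x110bda. The walk and the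
shadow step (`ShadowInv.prologue_ra`) are `prologue_walk` of Lemmas.lean; no routine is called. -/
theorem Vorbis.Spec.Worked.vorbis_decode_packet_rest_1a_ok : Vorbis.Spec.vorbis_decode_packet_rest_1a.Statement := by
  intro Lay hLay μ hμ u₀ hcode
  intro others frames len Ar stored room mode ysz u ret he hpre
  exact Vorbis.Spec.vorbis_decode_packet_rest_1a.prologue_walk Lay hLay μ hμ u₀ hcode others frames len Ar stored room mode ysz u ret
    he hpre
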